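-- pv_equiv track=rewrite | github.com/alexvoipnsk/voiptest | opt/megaco/processor/iua.py | Padding_Bytes_Counting
-- ===== SOURCE A (Python) =====
-- def Padding_Bytes_Counting(parameter_length):
-- 	initial_parameter_length = parameter_length
-- 	for i in range(1,4):
-- 		parameter_length = initial_parameter_length + i
-- 		if parameter_length % 4 == 0:
-- 			multiple_length = parameter_length
-- 			break
-- 	else:
-- 		raise IUA_Error("padding bytes counting error")
-- 	paddings_number = multiple_length - initial_parameter_length
-- 	return paddings_number
--
-- class IUA_Error(Exception):
--
-- 	def __init__(self, description):
-- 		self.description = description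
-- ===== SOURCE B (Python) =====
-- def Padding_Bytes_Counting(parameter_length):
-- 	rem = parameter_length % 4
-- 	if rem in (1, 2, 3):
-- 		return 4 - rem
-- 	raise IUA_Error("padding bytes counting error")
--
-- class IUA_Error(Exception):
--
-- 	def __init__(self, description):
-- 		self.description = description
-- ===== Notes on version B (the rewrite author's own statement) =====
-- stated objective: simpler
-- what changed: Replaces the 1..3 scan with one closed-form computation: rem = n % 4, return 4 - rem when rem is 1, 2 or 3, otherwise raise as A does.
import Mathlib
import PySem

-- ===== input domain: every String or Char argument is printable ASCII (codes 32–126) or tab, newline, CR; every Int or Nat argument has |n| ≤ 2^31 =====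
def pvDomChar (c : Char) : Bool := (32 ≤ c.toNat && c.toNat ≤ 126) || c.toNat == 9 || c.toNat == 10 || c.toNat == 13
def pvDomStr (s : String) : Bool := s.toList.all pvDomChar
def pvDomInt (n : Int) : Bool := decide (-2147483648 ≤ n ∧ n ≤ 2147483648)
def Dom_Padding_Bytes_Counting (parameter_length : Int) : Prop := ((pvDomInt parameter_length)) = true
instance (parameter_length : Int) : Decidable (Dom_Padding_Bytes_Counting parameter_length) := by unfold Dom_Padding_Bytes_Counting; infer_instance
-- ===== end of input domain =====

-- ===== PORT A =====
-- B changes A's 1..3 scan into a single closed-form `4 - n % 4` computation (objective: simpler).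
-- loop `for i in range(1,4): ... break` with the `else: raise`; the raise case (no i found) is
-- excluded by Pre_ and returns 0 here.
def pvLoopA (init : Int) : List Int → Int
  | [] => 0
  | i :: rest =>
    let pl := init + i
    if PySem.Int.mod pl 4 == 0 then pl - init else pvLoopA init rest

def Padding_Bytes_Counting (parameter_length : Int) : Int :=
  pvLoopA parameter_length (PySem.List.pyRange 1 4 1)

-- ===== PORT B =====
def Padding_Bytes_Counting_alt (parameter_length : Int) : Int :=
  let rem := PySem.Int.mod parameter_length 4
  if rem == 1 || rem == 2 || rem == 3 then 4 - rem
  else 0  -- raise IUA_Error: excluded by Pre_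

-- ===== PRECONDITION & SPEC =====
-- Pre_ excludes exactly the multiples of 4, on which the Python A (and B) raises IUA_Error.
def Pre_Padding_Bytes_Counting (parameter_length : Int) : Prop :=
  PySem.Int.mod parameter_length 4 ≠ 0
instance (parameter_length : Int) : Decidable (Pre_Padding_Bytes_Counting parameter_length) := by
  unfold Pre_Padding_Bytes_Counting; infer_instance
def pvWitness_Padding_Bytes_Counting : Int := 5

def Spec_Padding_Bytes_Counting (parameter_length : Int) (out : Int) : Prop := out = Padding_Bytes_Counting_alt parameter_length
instance (parameter_length : Int) (out : Int) : Decidable (Spec_Padding_Bytes_Counting parameter_length out) := by unfold Spec_Padding_Bytes_Counting; infer_instance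

-- ===== CLAIM =====
def Claim_equal_Padding_Bytes_Counting : Prop := ∀ (parameter_length : Int), Dom_Padding_Bytes_Counting parameter_length → Pre_Padding_Bytes_Counting parameter_length → Spec_Padding_Bytes_Counting parameter_length (Padding_Bytes_Counting parameter_length)

-- ===== LEMMAS AND PROOFS =====
theorem pv_key (n : Int) (h : PySem.Int.mod n 4 ≠ 0) :
    Padding_Bytes_Counting n = Padding_Bytes_Counting_alt n := by
  have hm : PySem.Int.mod n 4 = n % 4 := PySem.Int.mod_eq_emod_of_pos (by norm_num)
  have hb : (0:Int) ≤ n % 4 := Int.emod_nonneg n (by norm_num)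
  have hb2 : n % 4 < 4 := Int.emod_lt_of_pos n (by norm_num)
  have hr : n % 4 = 1 ∨ n % 4 = 2 ∨ n % 4 = 3 := by
    rw [hm] at h; omega
  have e1 : PySem.Int.mod (n + 1) 4 = (n % 4 + 1) % 4 := by
    rw [PySem.Int.mod_eq_emod_of_pos (by norm_num)]; omega
  have e2 : PySem.Int.mod (n + 2) 4 = (n % 4 + 2) % 4 := by
    rw [PySem.Int.mod_eq_emod_of_pos (by norm_num)]; omega
  have e3 : PySem.Int.mod (n + 3) 4 = (n % 4 + 3) % 4 := by
    rw [PySem.Int.mod_eq_emod_of_pos (by norm_num)]; omega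
  have hrange : PySem.List.pyRange 1 4 1 = [1, 2, 3] := by decide
  unfold Padding_Bytes_Counting Padding_Bytes_Counting_alt
  rw [hrange]
  rcases hr with h1 | h2 | h3
  · simp only [pvLoopA, e1, e2, e3, hm, h1]; norm_num
  · simp only [pvLoopA, e1, e2, e3, hm, h2]; norm_num
  · simp only [pvLoopA, e1, e2, e3, hm, h3]; norm_num

-- ===== VERDICT =====
theorem Padding_Bytes_Counting_spec : Claim_equal_Padding_Bytes_Counting := by
  intro n _ hpre
  exact pv_key n hpre
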